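-- pv_equiv track=rewrite | github.com/u0jin/bit_trace | trace.py | check_repeated_address
-- ===== SOURCE A (Python) =====
-- def check_repeated_address(transactions, threshold=1):
--     address_counts = {}
--     for transaction in transactions:
--         receiving_wallet = transaction['receiving_wallet']
--         if receiving_wallet in address_counts:
--             address_counts[receiving_wallet] += 1
--         else:
--             address_counts[receiving_wallet] = 1
--
--     for address, count in address_counts.items():
--         if count > threshold:
--             return address
--
--     return None
-- ===== SOURCE B (Python) =====
-- def check_repeated_address(transactions, threshold=1):
--     wallets = [t['receiving_wallet'] for t in transactions]
--     ws = sorted(wallets)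
--     frequent = set()
--     i = 0
--     n = len(ws)
--     while i < n:
--         j = i
--         while j < n and ws[j] == ws[i]:
--             j += 1
--         if j - i > threshold:
--             frequent.add(ws[i])
--         i = j
--     for w in wallets:
--         if w in frequent:
--             return w
--     return None
-- ===== Notes on version B (the rewrite author's own statement) =====
-- stated objective: alternative
-- what changed: Replaces A's counting dict and dict-items scan by sort-then-scan: sort the wallet list, detect runs longer than threshold with a two-index run scan to build the set of frequent addresses, then return the first wallet in original order that belongs to that set.
import Mathlib
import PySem

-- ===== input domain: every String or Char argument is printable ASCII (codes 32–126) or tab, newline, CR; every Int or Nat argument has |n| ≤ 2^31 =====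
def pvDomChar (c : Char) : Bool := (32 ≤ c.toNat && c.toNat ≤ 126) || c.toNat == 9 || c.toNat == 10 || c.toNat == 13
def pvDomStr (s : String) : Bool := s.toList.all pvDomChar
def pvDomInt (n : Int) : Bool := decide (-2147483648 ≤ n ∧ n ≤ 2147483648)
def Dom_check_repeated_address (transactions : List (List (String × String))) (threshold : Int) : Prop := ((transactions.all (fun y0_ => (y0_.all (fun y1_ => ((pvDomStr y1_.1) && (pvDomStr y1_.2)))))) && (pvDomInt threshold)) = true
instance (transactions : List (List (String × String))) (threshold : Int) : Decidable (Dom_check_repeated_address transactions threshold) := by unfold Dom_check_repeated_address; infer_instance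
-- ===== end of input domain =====

-- B replaces A's counting dict + dict-items scan by sort-then-scan: sort the wallets,
-- collect addresses whose sorted run is longer than the threshold, return the first
-- wallet (original order) in that set (alternative algorithm; no speed claim).


-- ===== PORT A =====
-- transaction['receiving_wallet']: KeyError when absent is excluded by Pre_; inside Pre_ the
-- .getD "" default is never used.
def pvWallet (t : List (String × String)) : String :=
  ((PySem.Dict.mk t).get? "receiving_wallet").getD ""

-- the second loop of A: 'for address, count in address_counts.items(): if count > threshold: return address'
def pvScanItems (items : List (String × Int)) (threshold : Int) : Option String :=
  match items with
  | [] => none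
  | (address, count) :: rest =>
      if count > threshold then some address else pvScanItems rest threshold

def check_repeated_address (transactions : List (List (String × String))) (threshold : Int) : Option String :=
  let address_counts := transactions.foldl (fun d transaction =>
      let receiving_wallet := pvWallet transaction
      if d.contains receiving_wallet then
        d.insert receiving_wallet (d.getD receiving_wallet 0 + 1)
      else
        d.insert receiving_wallet 1) PySem.Dict.empty
  pvScanItems address_counts.items threshold

-- ===== PORT B =====
-- the run-scanning while loop of B: walk the sorted list run by run, adding the head of
-- each run longer than threshold to the 'frequent' set (acc).
def pvFrequent (threshold : Int) (acc : PySem.Set String) : List String → PySem.Set String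
  | [] => acc
  | x :: xs =>
      let same := xs.takeWhile (· == x)
      let rest := xs.dropWhile (· == x)
      pvFrequent threshold
        (if ((same.length : Int) + 1 > threshold) then PySem.Set.add acc x else acc) rest
  termination_by l => l.length
  decreasing_by
    simpa using Nat.lt_succ_of_le (List.length_dropWhile_le _ _)

def check_repeated_address_alt (transactions : List (List (String × String))) (threshold : Int) : Option String :=
  let wallets := transactions.map pvWallet
  let ws := PySem.List.sorted wallets (fun x => x) false
  let frequent := pvFrequent threshold PySem.Set.empty ws
  wallets.find? (fun w => PySem.Set.contains frequent w)

-- ===== PRECONDITION & SPEC =====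
-- Pre_ excludes exactly the inputs where A raises KeyError: a transaction without the
-- 'receiving_wallet' key.
def Pre_check_repeated_address (transactions : List (List (String × String))) (threshold : Int) : Prop :=
  ∀ t ∈ transactions, "receiving_wallet" ∈ t.map Prod.fst
instance (transactions : List (List (String × String))) (threshold : Int) : Decidable (Pre_check_repeated_address transactions threshold) := by unfold Pre_check_repeated_address; infer_instance

def pvWitness_check_repeated_address : (List (List (String × String))) × Int :=
  ([[("receiving_wallet", "a")], [("receiving_wallet", "a")]], 1)

def Spec_check_repeated_address (transactions : List (List (String × String))) (threshold : Int) (out : Option String) : Prop := out = check_repeated_address_alt transactions threshold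
instance (transactions : List (List (String × String))) (threshold : Int) (out : Option String) : Decidable (Spec_check_repeated_address transactions threshold out) := by unfold Spec_check_repeated_address; infer_instance

-- ===== CLAIM (what is proved, stated in full; the proofs are below) =====
def Claim_equal_check_repeated_address : Prop := ∀ (transactions : List (List (String × String))) (threshold : Int), Dom_check_repeated_address transactions threshold → Pre_check_repeated_address transactions threshold → Spec_check_repeated_address transactions threshold (check_repeated_address transactions threshold)

-- ===== LEMMAS AND PROOFS =====

-- A's counting loop is the Counter loop: in the 'else' branch the default getD is 0.
theorem pvCounts_eq_counter (transactions : List (List (String × String))) :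
    transactions.foldl (fun d transaction =>
      let receiving_wallet := pvWallet transaction
      if d.contains receiving_wallet then
        d.insert receiving_wallet (d.getD receiving_wallet 0 + 1)
      else
        d.insert receiving_wallet 1) PySem.Dict.empty
    = PySem.Dict.counter (transactions.map pvWallet) := by
  rw [← PySem.Dict.foldl_insert_getD_add_one_eq_counter, List.foldl_map]
  apply PySem.List.foldl_congr_mem
  intro d t _
  simp only []
  by_cases h : d.contains (pvWallet t)
  · simp [h]
  · rw [PySem.Dict.getD_of_not_contains d 0 (by simpa using h)]
    simp [h]

-- A's items scan is find? over the items, projected to the key.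
theorem pvScanItems_eq_find (items : List (String × Int)) (threshold : Int) :
    pvScanItems items threshold
      = (items.find? (fun p => p.2 > threshold)).map Prod.fst := by
  induction items with
  | nil => rfl
  | cons p rest ih =>
      obtain ⟨a, c⟩ := p
      by_cases h : c > threshold
      · simp [pvScanItems, List.find?, h]
      · simp [pvScanItems, List.find?, h, ih]

-- find? commutes with the first-occurrence dedup Set.ofList builds by folding Set.add.
theorem find?_foldl_setAdd {α : Type} [BEq α] [LawfulBEq α] (p : α → Bool)
    (xs : List α) : ∀ (acc : List α),
    (xs.foldl PySem.Set.add acc).find? p = ((acc.find? p).or (xs.find? p)) := by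
  induction xs with
  | nil => intro acc; simp
  | cons x xs ih =>
      intro acc
      rw [List.foldl_cons, ih]
      by_cases hc : PySem.Set.contains acc x
      · have hxacc : x ∈ acc := by
          simpa [PySem.Set.contains] using hc
        rw [show PySem.Set.add acc x = acc by simp [PySem.Set.add, hxacc]]
        cases hfa : acc.find? p with
        | some v => simp
        | none =>
            have hpx : p x = false := by simpa using List.find?_eq_none.mp hfa x hxacc
            simp [List.find?, hpx]
      · have hxn : x ∉ acc := by
          simpa [PySem.Set.contains, List.contains_iff_mem] using hc
        rw [show PySem.Set.add acc x = acc ++ [x] by simp [PySem.Set.add, hxn]]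
        rw [List.find?_append]
        cases hfa : acc.find? p with
        | some v => simp
        | none =>
            cases hpx : p x <;> simp [List.find?, hpx]

theorem pvFrequent_mem_of_not_mem (threshold : Int) (w : String) :
    ∀ (acc : PySem.Set String) (l : List String), w ∉ l →
      (w ∈ pvFrequent threshold acc l ↔ w ∈ acc) := by
  intro acc l
  induction acc, l using pvFrequent.induct threshold with
  | case1 acc => intro _; simp [pvFrequent]
  | case2 acc x xs same rest ih =>
      intro hw
      have hwx : w ≠ x := fun h => hw (h ▸ List.mem_cons_self)
      have hwxs : w ∉ xs := fun h => hw (List.mem_cons_of_mem _ h)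
      have hwrest : w ∉ xs.dropWhile (· == x) :=
        fun h => hwxs ((List.dropWhile_sublist _).mem h)
      rw [pvFrequent]
      simp only [same, rest, dite_eq_ite] at ih
      rw [ih hwrest]
      split
      · rw [PySem.Set.mem_add]; simp [hwx]
      · rfl

theorem pvFrequent_mem_of_mem (threshold : Int) (w : String) :
    ∀ (acc : PySem.Set String) (l : List String), l.Pairwise (· ≤ ·) → w ∈ l →
      (w ∈ pvFrequent threshold acc l ↔ w ∈ acc ∨ (l.count w : Int) > threshold) := by
  intro acc l
  induction acc, l using pvFrequent.induct threshold with
  | case1 acc => intro _ h; cases h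
  | case2 acc x xs same rest ih =>
      intro hp hw
      have hsame : ∀ y ∈ xs.takeWhile (· == x), y = x := by
        intro y hy
        simpa using List.mem_takeWhile_imp hy
      have hdecomp : xs.takeWhile (· == x) ++ xs.dropWhile (· == x) = xs :=
        List.takeWhile_append_dropWhile
      have hprest : (xs.dropWhile (· == x)).Pairwise (· ≤ ·) :=
        List.Pairwise.sublist (List.dropWhile_sublist _) hp.of_cons
      have hxrest : x ∉ xs.dropWhile (· == x) := by
        intro hx
        cases hrest : xs.dropWhile (· == x) with
        | nil => rw [hrest] at hx; cases hx
        | cons r rs =>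
            have hne : xs.dropWhile (· == x) ≠ [] := by rw [hrest]; simp
            have hhead := List.head_dropWhile_not (· == x) hne
            have hrx : r ≠ x := by
              simp only [hrest, List.head_cons] at hhead
              simpa using hhead
            have hxle : x ≤ r := by
              have hr : r ∈ xs := (List.dropWhile_sublist _).mem (by rw [hrest]; exact List.mem_cons_self)
              exact (List.pairwise_cons.mp hp).1 r hr
            rw [hrest] at hx
            rcases List.mem_cons.mp hx with h | h
            · exact hrx h.symm
            · have hpw : (r :: rs).Pairwise (· ≤ ·) := hrest ▸ hprest
              have : r ≤ x := (List.pairwise_cons.mp hpw).1 x h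
              exact hrx (le_antisymm this hxle)
      have hcountx : xs.count x = (xs.takeWhile (· == x)).length := by
        conv_lhs => rw [← hdecomp]
        rw [List.count_append, List.count_eq_zero.mpr hxrest,
          List.count_eq_length.mpr (fun b hb => (hsame b hb).symm)]
        simp
      rw [pvFrequent]
      simp only [same, rest, dite_eq_ite] at ih
      by_cases hwx : w = x
      · rw [pvFrequent_mem_of_not_mem threshold w _ _ (hwx ▸ hxrest)]
        have hc : (((x :: xs).count w : Nat) : Int) = ((xs.takeWhile (· == x)).length : Int) + 1 := by
          rw [hwx, List.count_cons_self, hcountx]; push_cast; ring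
        rw [hc]
        split
        · rw [hwx, PySem.Set.mem_add]; tauto
        · tauto
      · have hwxs : w ∈ xs := (List.mem_cons.mp hw).resolve_left hwx
        have hwsame : w ∉ xs.takeWhile (· == x) := fun h => hwx (hsame w h)
        have hwrest : w ∈ xs.dropWhile (· == x) := by
          have hsplit : w ∈ xs.takeWhile (· == x) ++ xs.dropWhile (· == x) := by
            rw [hdecomp]; exact hwxs
          exact (List.mem_append.mp hsplit).resolve_left hwsame
        rw [ih hprest hwrest]
        have hc : (x :: xs).count w = (xs.dropWhile (· == x)).count w := by
          rw [List.count_cons_of_ne (by simpa using Ne.symm hwx)]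
          conv_lhs => rw [← hdecomp]
          rw [List.count_append, List.count_eq_zero.mpr hwsame]
          simp
        rw [hc]
        split
        · rw [PySem.Set.mem_add]; simp [hwx]
        · rfl

theorem pvFind?_congr_mem {α : Type} (p q : α → Bool) (l : List α)
    (h : ∀ x ∈ l, p x = q x) : l.find? p = l.find? q := by
  induction l with
  | nil => rfl
  | cons x xs ih =>
      have hx := h x List.mem_cons_self
      simp only [List.find?_cons, hx]
      cases q x
      · exact ih (fun y hy => h y (List.mem_cons_of_mem _ hy))
      · rfl

-- ===== VERDICT (by name: the statement is the Claim_ definition above) =====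
theorem check_repeated_address_spec : Claim_equal_check_repeated_address := by
  intro transactions threshold _ _
  unfold Spec_check_repeated_address check_repeated_address check_repeated_address_alt
  rw [pvCounts_eq_counter, pvScanItems_eq_find, PySem.Dict.items_counter]
  set ws := transactions.map pvWallet with hws
  rw [List.find?_map]
  have hcomp : ((fun p => decide (p.2 > threshold)) ∘ (fun k => (k, (ws.count k : Int))))
      = fun w => decide ((ws.count w : Int) > threshold) := by
    funext w; rfl
  rw [hcomp]
  rw [show PySem.Set.ofList ws = ws.foldl PySem.Set.add [] from PySem.Set.ofList_eq_foldl ws]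
  rw [find?_foldl_setAdd (fun w => decide ((ws.count w : Int) > threshold)) ws []]
  simp only [List.find?_nil, Option.none_or]
  rw [Option.map_map]
  rw [show (Prod.fst ∘ fun k => (k, (ws.count k : Int))) = id from rfl, Option.map_id]
  apply pvFind?_congr_mem
  intro w hw
  have hperm : (PySem.List.sorted ws (fun x => x) false).Perm ws :=
    PySem.List.sorted_perm ws (fun x => x) false
  have hpair : (PySem.List.sorted ws (fun x => x) false).Pairwise (· ≤ ·) := by
    simpa using PySem.List.sorted_pairwise ws (fun x => x)
  have hmemf : w ∈ pvFrequent threshold PySem.Set.empty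
      (PySem.List.sorted ws (fun x => x) false) ↔ ((ws.count w : Int) > threshold) := by
    rw [pvFrequent_mem_of_mem threshold w _ _ hpair (hperm.mem_iff.mpr hw),
      hperm.count_eq]
    simp [PySem.Set.empty]
  by_cases hc : (ws.count w : Int) > threshold
  · simp only [hc, decide_true]
    exact ((PySem.Set.contains_iff _ _).mpr (hmemf.mpr hc)).symm
  · simp only [hc, decide_false]
    symm
    rw [Bool.eq_false_iff]
    intro hcontra
    exact hc (hmemf.mp ((PySem.Set.contains_iff _ _).mp hcontra))
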